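-- pv_equiv track=rewrite | github.com/vardhanreddy369/subsidiary-tracker | backend/scraper/merger.py | _compute_timeline
-- ===== SOURCE A (Python) =====
-- from typing import Dict, List
--
-- def _compute_timeline(
--     first_seen: str, last_seen: str, all_fdates: List[str]
-- ) -> tuple:
--     """
--     Compute TimeIn, TimeOut, and Confidence for a subsidiary.
--     Same algorithm as data_loader.compute_timelines.
--     """
--     if not all_fdates:
--         return ("Unknown", "Unknown", "LOW")
--
--     earliest_filing = all_fdates[0]
--     latest_filing = all_fdates[-1]
--
--     # TimeIn
--     if first_seen <= earliest_filing:
--         time_in = "On or before %s" % earliest_filing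
--         confidence_in = "LOW"
--     else:
--         prev_filing = None
--         for f in all_fdates:
--             if f < first_seen:
--                 prev_filing = f
--             else:
--                 break
--         if prev_filing is not None:
--             time_in = "Between %s and %s" % (prev_filing, first_seen)
--             confidence_in = "HIGH"
--         else:
--             time_in = "On or before %s" % first_seen
--             confidence_in = "LOW"
--
--     # TimeOut
--     if last_seen >= latest_filing:
--         time_out = "Active as of %s" % latest_filing
--         confidence_out = "ACTIVE"
--     else:
--         next_filing = None
--         for f in all_fdates:
--             if f > last_seen:
--                 next_filing = f
--                 break
--         if next_filing is not None:
--             time_out = "Between %s and %s" % (last_seen, next_filing)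
--             confidence_out = "HIGH"
--         else:
--             time_out = "After %s" % last_seen
--             confidence_out = "LOW"
--
--     # Overall confidence
--     if confidence_in == "HIGH" and confidence_out in ("HIGH", "ACTIVE"):
--         confidence = "HIGH"
--     elif confidence_in == "LOW" and confidence_out == "LOW":
--         confidence = "LOW"
--     else:
--         confidence = "MEDIUM"
--
--     return (time_in, time_out, confidence)
-- ===== SOURCE B (Python) =====
-- # B: collapses A's dead branches ("On or before first_seen"/"After last_seen" and the
-- # LOW/LOW case are unreachable for a nonempty list), derives confidence directly from
-- # the first_seen > all_fdates[0] test, and finds the bracketing filing by scanning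
-- # adjacent pairs instead of maintaining a running "previous filing" accumulator.
-- def _compute_timeline(first_seen, last_seen, all_fdates):
--     if not all_fdates:
--         return ("Unknown", "Unknown", "LOW")
--     lo, hi = all_fdates[0], all_fdates[-1]
--     if first_seen <= lo:
--         time_in, confidence = "On or before %s" % lo, "MEDIUM"
--     else:
--         prev = next((a for a, b in zip(all_fdates, all_fdates[1:])
--                      if b >= first_seen), hi)
--         time_in, confidence = "Between %s and %s" % (prev, first_seen), "HIGH"
--     if last_seen >= hi:
--         time_out = "Active as of %s" % hi
--     else:
--         nxt = next(f for f in all_fdates if f > last_seen)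
--         time_out = "Between %s and %s" % (last_seen, nxt)
--     return (time_in, time_out, confidence)
-- ===== Notes on version B (the rewrite author's own statement) =====
-- stated objective: simpler
-- what changed: B drops A's unreachable branches (the 'On or before first_seen'/'After last_seen' fallbacks and the LOW/LOW case never fire for a nonempty list), derives the confidence directly from the single test first_seen > all_fdates[0], and finds the bracketing filing by scanning adjacent pairs instead of carrying a running previous-filing accumulator.
import Mathlib
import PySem

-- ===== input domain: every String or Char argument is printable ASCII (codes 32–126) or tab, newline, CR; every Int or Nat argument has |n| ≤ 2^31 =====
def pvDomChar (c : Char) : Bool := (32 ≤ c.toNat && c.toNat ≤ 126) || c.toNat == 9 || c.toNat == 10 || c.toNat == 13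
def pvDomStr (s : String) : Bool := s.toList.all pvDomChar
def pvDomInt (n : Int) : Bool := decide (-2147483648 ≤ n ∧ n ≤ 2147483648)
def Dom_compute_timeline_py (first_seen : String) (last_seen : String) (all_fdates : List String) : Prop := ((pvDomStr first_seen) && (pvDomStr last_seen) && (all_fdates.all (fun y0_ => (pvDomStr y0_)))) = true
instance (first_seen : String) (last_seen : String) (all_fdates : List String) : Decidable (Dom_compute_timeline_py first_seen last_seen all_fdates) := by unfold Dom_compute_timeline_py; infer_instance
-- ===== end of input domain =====

-- B simplifies A: the "On or before first_seen"/"After last_seen" branches and the LOW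
-- overall confidence are unreachable for a nonempty list, so B drops them, derives the
-- confidence directly, and finds the bracketing filing by an adjacent-pair scan.
-- The Python return is a 3-tuple of strings, rendered as a 3-element List String.

-- ===== PORT A =====
-- A's TimeIn loop: keep updating prev while f < first_seen, stop at the first f ≥ first_seen
def pvPrevLoop (fs : String) : List String → Option String → Option String
  | [], prev => prev
  | f :: rest, prev => if f < fs then pvPrevLoop fs rest (some f) else prev

-- A's TimeOut loop: first f with f > last_seen
def pvNextLoop (ls : String) : List String → Option String
  | [] => none
  | f :: rest => if ls < f then some f else pvNextLoop ls rest

def compute_timeline_py (first_seen : String) (last_seen : String) (all_fdates : List String) : List String :=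
  match all_fdates with
  | [] => ["Unknown", "Unknown", "LOW"]
  | a :: rest =>
    let earliest := a                      -- all_fdates[0]
    let latest := rest.getLastD a          -- all_fdates[-1]
    let tin : String × String :=
      if first_seen ≤ earliest then
        ("On or before " ++ earliest, "LOW")
      else
        match pvPrevLoop first_seen (a :: rest) none with
        | some p => ("Between " ++ p ++ " and " ++ first_seen, "HIGH")
        | none => ("On or before " ++ first_seen, "LOW")
    let tout : String × String :=
      if latest ≤ last_seen then
        ("Active as of " ++ latest, "ACTIVE")
      else
        match pvNextLoop last_seen (a :: rest) with
        | some n => ("Between " ++ last_seen ++ " and " ++ n, "HIGH")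
        | none => ("After " ++ last_seen, "LOW")
    let confidence : String :=
      if tin.2 == "HIGH" && (tout.2 == "HIGH" || tout.2 == "ACTIVE") then "HIGH"
      else if tin.2 == "LOW" && tout.2 == "LOW" then "LOW"
      else "MEDIUM"
    [tin.1, tout.1, confidence]

-- ===== PORT B =====
-- B's adjacent-pair scan: first pair (a, b) of consecutive filings with b ≥ first_seen
def pvPairScan (fs : String) : List String → Option String
  | a :: b :: rest => if fs ≤ b then some a else pvPairScan fs (b :: rest)
  | _ => none

-- B's next(f for f in all_fdates if f > last_seen); none = the (unreachable) exhausted generator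
def pvNextGen (ls : String) : List String → Option String
  | [] => none
  | f :: rest => if ls < f then some f else pvNextGen ls rest

def compute_timeline_py_alt (first_seen : String) (last_seen : String) (all_fdates : List String) : List String :=
  match all_fdates with
  | [] => ["Unknown", "Unknown", "LOW"]
  | a :: rest =>
    let lo := a
    let hi := rest.getLastD a
    let tic : String × String :=
      if first_seen ≤ lo then ("On or before " ++ lo, "MEDIUM")
      else
        (("Between " ++ (pvPairScan first_seen (a :: rest)).getD hi ++ " and " ++ first_seen), "HIGH")
    let time_out : String :=
      if hi ≤ last_seen then "Active as of " ++ hi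
      else "Between " ++ last_seen ++ " and " ++ (pvNextGen last_seen (a :: rest)).getD ""
    [tic.1, time_out, tic.2]

-- ===== PRECONDITION & SPEC =====
def Spec_compute_timeline_py (first_seen : String) (last_seen : String) (all_fdates : List String) (out : List String) : Prop := out = compute_timeline_py_alt first_seen last_seen all_fdates
instance (first_seen : String) (last_seen : String) (all_fdates : List String) (out : List String) : Decidable (Spec_compute_timeline_py first_seen last_seen all_fdates out) := by unfold Spec_compute_timeline_py; infer_instance

-- ===== CLAIM (what is proved, stated in full; the proofs are below) =====
def Claim_equal_compute_timeline_py : Prop := ∀ (first_seen : String) (last_seen : String) (all_fdates : List String), Dom_compute_timeline_py first_seen last_seen all_fdates → Spec_compute_timeline_py first_seen last_seen all_fdates (compute_timeline_py first_seen last_seen all_fdates)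

-- ===== LEMMAS AND PROOFS =====

-- A's running-prev loop, once seeded, returns exactly B's pair scan (with the last element as default)
theorem prevLoop_eq_pairScan (fs : String) (rest : List String) (x : String) :
    pvPrevLoop fs rest (some x) = some ((pvPairScan fs (x :: rest)).getD (rest.getLastD x)) := by
  induction rest generalizing x with
  | nil => simp [pvPrevLoop, pvPairScan]
  | cons b r ih =>
    by_cases hb : b < fs
    · have hnb : ¬ fs ≤ b := not_le.mpr hb
      simp only [pvPrevLoop, pvPairScan, if_pos hb, if_neg hnb]
      rw [ih b, List.getLastD_cons]
    · have hnb : fs ≤ b := not_lt.mp hb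
      simp only [pvPrevLoop, pvPairScan, if_neg hb, if_pos hnb, Option.getD_some]

theorem nextLoop_none_all_le (ls : String) (l : List String) (h : pvNextLoop ls l = none) :
    ∀ f ∈ l, f ≤ ls := by
  induction l with
  | nil => simp
  | cons a r ih =>
    by_cases ha : ls < a
    · simp [pvNextLoop, ha] at h
    · intro f hf
      rcases List.mem_cons.mp hf with rfl | hf
      · exact not_lt.mp ha
      · exact ih (by simpa [pvNextLoop, ha] using h) f hf

theorem getLastD_mem (rest : List String) (a : String) : rest.getLastD a ∈ a :: rest := by
  induction rest generalizing a with
  | nil => simp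
  | cons b r ih =>
    rw [List.getLastD_cons]
    exact List.mem_cons_of_mem a (ih b)

-- the two next-filing scans are literally the same recursion
theorem nextLoop_eq_nextGen (ls : String) (l : List String) : pvNextLoop ls l = pvNextGen ls l := by
  induction l with
  | nil => rfl
  | cons a r ih => simp [pvNextLoop, pvNextGen, ih]

-- ===== VERDICT (by name: the statement is the Claim_ definition above) =====
theorem compute_timeline_py_spec : Claim_equal_compute_timeline_py := by
  intro fs ls all _
  unfold Spec_compute_timeline_py
  cases all with
  | nil => rfl
  | cons a rest =>
    simp only [compute_timeline_py, compute_timeline_py_alt]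
    by_cases hin : fs ≤ a
    · rw [if_pos hin, if_pos hin]
      by_cases hout : rest.getLastD a ≤ ls
      · rw [if_pos hout, if_pos hout]; simp
      · rw [if_neg hout, if_neg hout]
        rcases hnx : pvNextLoop ls (a :: rest) with _ | n
        · exact absurd (nextLoop_none_all_le ls (a :: rest) hnx _ (getLastD_mem rest a)) hout
        · have hng : pvNextGen ls (a :: rest) = some n := nextLoop_eq_nextGen ls (a :: rest) ▸ hnx
          rw [hng]; simp
    · have ha : a < fs := not_le.mp hin
      have hstep : pvPrevLoop fs (a :: rest) none
          = some ((pvPairScan fs (a :: rest)).getD (rest.getLastD a)) := by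
        simp only [pvPrevLoop, if_pos ha]
        exact prevLoop_eq_pairScan fs rest a
      rw [if_neg hin, if_neg hin, hstep]
      by_cases hout : rest.getLastD a ≤ ls
      · rw [if_pos hout, if_pos hout]; simp
      · rw [if_neg hout, if_neg hout]
        rcases hnx : pvNextLoop ls (a :: rest) with _ | n
        · exact absurd (nextLoop_none_all_le ls (a :: rest) hnx _ (getLastD_mem rest a)) hout
        · have hng : pvNextGen ls (a :: rest) = some n := nextLoop_eq_nextGen ls (a :: rest) ▸ hnx
          rw [hng]; simp
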